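-- pv_equiv track=rewrite | github.com/JPlin/image_crawler | Utils.py | seperator
-- ===== SOURCE A (Python) =====
-- def seperator(total, workers, start=0):
--     num = total // workers
--     rem = total % workers
--     ins = [start] * (workers + 1)
--
--     for n in range(1, workers + 1):
--         ins[n] = ins[n - 1] + num
--         if n <= rem:
--             ins[n] += 1
--
--     return ins
-- ===== SOURCE B (Python) =====
-- def seperator(total, workers, start=0):
--     num = total // workers
--     rem = total % workers
--     return [start + n * num + min(n, rem) for n in range(workers + 1)]
-- ===== Notes on version B (the rewrite author's own statement) =====
-- stated objective: simpler
-- what changed: Replaced the mutated prefix-sum array (ins[n] = ins[n-1] + num, conditional +1) with an independent closed-form expression start + n*num + min(n, rem) per index, removing the element-to-element dependency.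
import Mathlib
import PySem

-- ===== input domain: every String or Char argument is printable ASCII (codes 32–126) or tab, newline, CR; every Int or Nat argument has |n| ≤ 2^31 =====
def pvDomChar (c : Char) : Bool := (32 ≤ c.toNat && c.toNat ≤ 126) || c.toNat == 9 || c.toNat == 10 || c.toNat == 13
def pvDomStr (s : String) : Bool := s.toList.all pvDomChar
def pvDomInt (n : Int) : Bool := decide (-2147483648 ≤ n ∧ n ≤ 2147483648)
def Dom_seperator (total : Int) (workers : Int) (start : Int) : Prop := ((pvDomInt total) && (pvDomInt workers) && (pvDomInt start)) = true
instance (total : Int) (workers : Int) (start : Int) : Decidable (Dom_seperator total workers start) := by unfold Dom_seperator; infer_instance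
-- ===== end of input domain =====

-- B replaces A's running-sum mutation of ins with an independent closed form per index (objective: simpler).

-- ===== PORT A =====
-- literal port of A: build ins = [start]*(workers+1), then for n in range(1, workers+1)
-- set ins[n] = ins[n-1] + num and, if n <= rem, increment ins[n] by 1.
def seperator (total : Int) (workers : Int) (start : Int) : List Int :=
  let num := PySem.Int.floordiv total workers
  let rem := PySem.Int.mod total workers
  let ins := List.replicate (workers + 1).toNat start
  (PySem.List.pyRange 1 (workers + 1) 1).foldl
    (fun ins n =>
      let ins1 := ins.set n.toNat (PySem.List.pyGetD ins (n - 1) 0 + num)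
      if n ≤ rem then ins1.set n.toNat (PySem.List.pyGetD ins1 n 0 + 1) else ins1)
    ins

-- ===== PORT B =====
def seperator_alt (total : Int) (workers : Int) (start : Int) : List Int :=
  let num := PySem.Int.floordiv total workers
  let rem := PySem.Int.mod total workers
  (PySem.List.pyRange 0 (workers + 1) 1).map (fun n => start + n * num + min n rem)

-- ===== PRECONDITION & SPEC =====
-- Pre_ excludes only workers = 0, where Python A raises ZeroDivisionError (B raises it too).
def Pre_seperator (total : Int) (workers : Int) (start : Int) : Prop := workers ≠ 0
instance (total : Int) (workers : Int) (start : Int) : Decidable (Pre_seperator total workers start) := by unfold Pre_seperator; infer_instance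
def pvWitness_seperator : Int × Int × Int := (10, 3, 2)

def Spec_seperator (total : Int) (workers : Int) (start : Int) (out : List Int) : Prop := out = seperator_alt total workers start
instance (total : Int) (workers : Int) (start : Int) (out : List Int) : Decidable (Spec_seperator total workers start out) := by unfold Spec_seperator; infer_instance

-- ===== CLAIM (what is proved, stated in full; the proofs are below) =====
def Claim_equal_seperator : Prop := ∀ (total : Int) (workers : Int) (start : Int), Dom_seperator total workers start → Pre_seperator total workers start → Spec_seperator total workers start (seperator total workers start)

-- ===== LEMMAS AND PROOFS =====

-- setting the cell just past a prefix of known length replaces the head of the tail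
theorem pv_set_head (L1 rest : List Int) (x y : Int) :
    (L1 ++ x :: rest).set L1.length y = L1 ++ y :: rest := by
  induction L1 with
  | nil => rfl
  | cons a t ih => simp [ih]

-- reading the cell just past a prefix of known length gives the head of the tail
theorem pv_getD_head (L1 rest : List Int) (x d : Int) :
    (L1 ++ x :: rest).getD L1.length d = x := by
  induction L1 with
  | nil => rfl
  | cons a t ih => simpa using ih

-- loop invariant: after processing n = 1..k, the first k+1 cells hold the closed form
theorem pv_loop_inv (num rem start : Int) (hrem : 0 ≤ rem) (w k : Nat) (hk : k ≤ w) :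
    (PySem.List.pyRange 1 ((k : Int) + 1) 1).foldl
      (fun ins n =>
        let ins1 := ins.set n.toNat (PySem.List.pyGetD ins (n - 1) 0 + num)
        if n ≤ rem then ins1.set n.toNat (PySem.List.pyGetD ins1 n 0 + 1) else ins1)
      (List.replicate (w + 1) start)
    = (List.range (k + 1)).map (fun i : Nat => start + (i : Int) * num + min (i : Int) rem)
      ++ List.replicate (w - k) start := by
  induction k with
  | zero =>
      rw [PySem.List.pyRange_one_eq_nil (by omega)]
      have h0 : min (0 : Int) rem = 0 := min_eq_left hrem
      rw [List.replicate_succ]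
      simp [h0]
  | succ k ih =>
      have hk' : k ≤ w := by omega
      have hsplit : PySem.List.pyRange 1 ((↑(k+1) : Int) + 1) 1
          = PySem.List.pyRange 1 ((k : Int) + 1) 1 ++ [((k : Int) + 1)] := by
        push_cast
        exact PySem.List.pyRange_one_succ_right (by omega)
      rw [hsplit, List.foldl_append, ih hk']
      rw [List.foldl_cons, List.foldl_nil]
      set f : Nat → Int := fun i => start + (i : Int) * num + min (i : Int) rem with hf
      set L1 := (List.range (k + 1)).map f with hL1
      have hlen : L1.length = k + 1 := by simp [hL1]
      have hrep : List.replicate (w - k) start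
          = start :: List.replicate (w - (k + 1)) start := by
        have hwk : w - k = (w - (k + 1)) + 1 := by omega
        rw [hwk, List.replicate_succ]
      have htoNat : ((k : Int) + 1).toNat = k + 1 := by omega
      have hget1 : PySem.List.pyGetD (L1 ++ List.replicate (w - k) start)
          ((k : Int) + 1 - 1) 0 = f k := by
        have h1 : (k : Int) + 1 - 1 = ((k : Nat) : Int) := by omega
        rw [h1, PySem.List.pyGetD_natCast]
        rw [List.getD_append _ _ _ _ (by omega)]
        rw [List.getD_eq_getElem _ _ (by simp [hL1])]
        simp [hL1]
      have hset1 := pv_set_head L1 (List.replicate (w - (k + 1)) start) start (f k + num)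
      rw [hlen] at hset1
      have hget2 : PySem.List.pyGetD (L1 ++ (f k + num) :: List.replicate (w - (k + 1)) start)
          ((k : Int) + 1) 0 = f k + num := by
        have h2 : (k : Int) + 1 = ((k + 1 : Nat) : Int) := by push_cast; ring
        rw [h2, PySem.List.pyGetD_natCast, ← hlen]
        exact pv_getD_head _ _ _ _
      have hset2 := pv_set_head L1 (List.replicate (w - (k + 1)) start) (f k + num) (f k + num + 1)
      rw [hlen] at hset2
      have hRHS : (List.range (k + 1 + 1)).map f = L1 ++ [f (k + 1)] := by
        rw [List.range_succ, List.map_append, ← hL1]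
        simp
      dsimp only
      rw [htoNat, hget1, hrep, hset1]
      rw [hRHS, List.append_assoc, List.singleton_append]
      by_cases hc : (k : Int) + 1 ≤ rem
      · rw [if_pos hc, hget2, hset2]
        have hmin : min ((k : Int) + 1) rem = min (k : Int) rem + 1 := by omega
        have hfval : f (k + 1) = f k + num + 1 := by
          simp only [hf]; push_cast; rw [hmin]; ring
        rw [hfval]
      · rw [if_neg hc]
        have hmin : min ((k : Int) + 1) rem = min (k : Int) rem := by omega
        have hfval : f (k + 1) = f k + num := by
          simp only [hf]; push_cast; rw [hmin]; ring
        rw [hfval]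

theorem seperator_spec : Claim_equal_seperator := by
  intro total workers start _ hpre
  unfold Spec_seperator
  by_cases hw : 0 < workers
  · obtain ⟨w, rfl⟩ : ∃ w : Nat, workers = (w : Int) := ⟨workers.toNat, by omega⟩
    simp only [seperator, seperator_alt]
    have hrem : 0 ≤ PySem.Int.mod total (w : Int) := by
      rw [PySem.Int.mod_eq_emod_of_pos hw]
      exact Int.emod_nonneg _ (by omega)
    have htoNat : ((w : Int) + 1).toNat = w + 1 := by omega
    rw [htoNat,
      pv_loop_inv (PySem.Int.floordiv total (w : Int)) (PySem.Int.mod total (w : Int))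
        start hrem w w le_rfl]
    rw [PySem.List.pyRange_one]
    have h2 : (((w : Int) + 1) - 0).toNat = w + 1 := by omega
    rw [h2, Nat.sub_self, List.replicate_zero, List.append_nil, List.map_map]
    apply List.map_congr_left
    intro i hi
    simp
  · have hwneg : workers < 0 := by
      rcases lt_trichotomy workers 0 with h | h | h
      · exact h
      · exact absurd h hpre
      · exact absurd h hw
    simp only [seperator, seperator_alt]
    rw [PySem.List.pyRange_one_eq_nil (show workers + 1 ≤ 1 by omega)]
    rw [PySem.List.pyRange_one_eq_nil (show workers + 1 ≤ 0 by omega)]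
    have h0 : (workers + 1).toNat = 0 := by omega
    simp [h0]
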